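-- pv_equiv track=rewrite | github.com/Martin8520/Python_Projects | Practice/general_practice/count_subarrays_where_max_el_appears_k_times.py | count_valid_subarrays
-- ===== SOURCE A (Python) =====
-- def count_valid_subarrays(nums, k):
--     n = len(nums)
--     count = 0
--     start = 0
--     freq = {}
--     max_freq = 0
--
--     for end in range(n):
--         num = nums[end]
--         if num in freq:
--             freq[num] += 1
--         else:
--             freq[num] = 1
--
--         max_freq = max(max_freq, freq[num])
--
--         while max_freq >= k:
--             count += n - end
--
--             freq[nums[start]] -= 1
--             if freq[nums[start]] == 0:
--                 del freq[nums[start]]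
--             start += 1
--
--             max_freq = max(freq.values(), default=0)
--
--     return count
-- ===== SOURCE B (Python) =====
-- def count_valid_subarrays(nums, k):
--     # Complement counting: total subarrays minus "bad" subarrays (every
--     # element's frequency < k).  Only the newly added element can reach
--     # frequency k, so the window shrinks while its count is >= k.
--     n = len(nums)
--     freq = {}
--     start = 0
--     bad = 0
--     for end in range(n):
--         x = nums[end]
--         freq[x] = freq.get(x, 0) + 1
--         while freq[x] >= k:
--             freq[nums[start]] -= 1
--             start += 1
--         bad += end - start + 1
--     return n * (n + 1) // 2 - bad
-- ===== Notes on version B (the rewrite author's own statement) =====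
-- stated objective: faster
-- what changed: A counts good subarrays directly and rescans every dict value (max(freq.values())) after each shrink step to recompute the window's maximal frequency; B counts the complement (subarrays where every frequency < k) with a sliding window that only watches the newly added element's count, so no values-rescan exists, and returns n*(n+1)//2 minus that count.
import Mathlib
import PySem

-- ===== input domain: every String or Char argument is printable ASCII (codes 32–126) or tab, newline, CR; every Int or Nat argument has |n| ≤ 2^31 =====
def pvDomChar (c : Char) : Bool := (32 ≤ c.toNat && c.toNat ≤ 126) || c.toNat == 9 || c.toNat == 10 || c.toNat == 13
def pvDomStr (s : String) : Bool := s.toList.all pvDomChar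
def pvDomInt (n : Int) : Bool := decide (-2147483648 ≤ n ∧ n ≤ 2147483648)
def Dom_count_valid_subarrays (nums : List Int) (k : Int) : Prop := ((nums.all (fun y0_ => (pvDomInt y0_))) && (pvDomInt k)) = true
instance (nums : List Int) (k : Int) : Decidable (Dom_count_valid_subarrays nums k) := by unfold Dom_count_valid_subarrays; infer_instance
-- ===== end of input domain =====

-- B replaces A's sliding window (which rescans all dict values to recompute the maximal
-- frequency after every shrink step) by complement counting with a window in which only
-- the newly added element's count can reach k; equivalence is about the return value
-- (neither program mutates its arguments).

-- ===== PORT A =====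
-- the `while max_freq >= k` loop of A; fuel ≥ number of iterations under Pre_
def aWhile (nums : List Int) (k n e : Int) :
    Nat → Int × Int × PySem.Dict Int Int × Int → Int × Int × PySem.Dict Int Int × Int
  | 0, st => st
  | fuel + 1, (count, start, freq, maxf) =>
    if k ≤ maxf then
      let count := count + (n - e)
      match PySem.List.pyGet? nums start with
      | none => (count, start, freq, maxf)        -- Python raises IndexError here (outside Pre_)
      | some y =>
        match freq.get? y with
        | none => (count, start, freq, maxf)      -- Python raises KeyError here (outside Pre_)
        | some v =>
          let freq := freq.insert y (v - 1)
          let freq := if v - 1 = 0 then freq.erase y else freq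
          let start := start + 1
          let maxf := match PySem.List.max? freq.values (fun w => w) with
                      | none => 0
                      | some m => m
          aWhile nums k n e fuel (count, start, freq, maxf)
    else (count, start, freq, maxf)

-- the body of A's `for end in range(n)` loop
def aStep (nums : List Int) (k n : Int) (st : Int × Int × PySem.Dict Int Int × Int) (e : Int) :
    Int × Int × PySem.Dict Int Int × Int :=
  match PySem.List.pyGet? nums e with
  | none => st                                   -- unreachable: e ∈ range(n)
  | some num =>
    let (count, start, freq, maxf) := st
    let freq := if freq.contains num then freq.insert num (freq.getD num 0 + 1)
                else freq.insert num 1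
    let maxf := max maxf (freq.getD num 0)
    aWhile nums k n e (nums.length + 1) (count, start, freq, maxf)

def count_valid_subarrays (nums : List Int) (k : Int) : Int :=
  let n : Int := nums.length
  let st := (PySem.List.pyRange 0 n 1).foldl (aStep nums k n) (0, 0, PySem.Dict.empty, 0)
  st.1

-- ===== PORT B =====
-- the `while freq[x] >= k` loop of B; fuel ≥ number of iterations under Pre_
def bWhile (nums : List Int) (k x : Int) :
    Nat → PySem.Dict Int Int × Int → PySem.Dict Int Int × Int
  | 0, st => st
  | fuel + 1, (freq, start) =>
    if k ≤ freq.getD x 0 then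
      match PySem.List.pyGet? nums start with
      | none => (freq, start)                    -- Python raises IndexError here (outside Pre_)
      | some y =>
        match freq.get? y with
        | none => (freq, start)                  -- Python raises KeyError here (outside Pre_)
        | some v => bWhile nums k x fuel (freq.insert y (v - 1), start + 1)
    else (freq, start)

-- the body of B's `for end in range(n)` loop
def bStep (nums : List Int) (k : Int) (st : PySem.Dict Int Int × Int × Int) (e : Int) :
    PySem.Dict Int Int × Int × Int :=
  match PySem.List.pyGet? nums e with
  | none => st                                   -- unreachable: e ∈ range(n)
  | some x =>
    let (freq, start, bad) := st
    let freq := freq.insert x (freq.getD x 0 + 1)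
    let (freq, start) := bWhile nums k x (nums.length + 1) (freq, start)
    (freq, start, bad + (e - start + 1))

def count_valid_subarrays_alt (nums : List Int) (k : Int) : Int :=
  let n : Int := nums.length
  let st := (PySem.List.pyRange 0 n 1).foldl (bStep nums k) (PySem.Dict.empty, 0, 0)
  PySem.Int.floordiv (n * (n + 1)) 2 - st.2.2

-- ===== PRECONDITION & SPEC =====
-- Pre_ excludes k ≤ 0 with a nonempty list: there BOTH programs raise
-- (KeyError/IndexError while shrinking an already-empty window), so no value exists to match.
def Pre_count_valid_subarrays (nums : List Int) (k : Int) : Prop := 1 ≤ k ∨ nums = []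
instance (nums : List Int) (k : Int) : Decidable (Pre_count_valid_subarrays nums k) := by
  unfold Pre_count_valid_subarrays; infer_instance

def pvWitness_count_valid_subarrays : List Int × Int := ([1, 2, 1, 1, 3], 2)

def Spec_count_valid_subarrays (nums : List Int) (k : Int) (out : Int) : Prop := out = count_valid_subarrays_alt nums k
instance (nums : List Int) (k : Int) (out : Int) : Decidable (Spec_count_valid_subarrays nums k out) := by unfold Spec_count_valid_subarrays; infer_instance

-- ===== CLAIM (what is proved, stated in full; the proofs are below) =====
def Claim_equal_count_valid_subarrays : Prop := ∀ (nums : List Int) (k : Int), Dom_count_valid_subarrays nums k → Pre_count_valid_subarrays nums k → Spec_count_valid_subarrays nums k (count_valid_subarrays nums k)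

-- ===== LEMMAS AND PROOFS =====

-- occurrences of x among the first e elements of l
def gcnt (l : List Int) (e : ℕ) (x : Int) : ℕ := (l.take e).count x
-- occurrences of x in the window l[s:e]
def cnt (l : List Int) (s e : ℕ) (x : Int) : ℤ := (gcnt l e x : ℤ) - (gcnt l s x : ℤ)
-- "some element of the window l[s:e] occurs at least k times in it"
def goodb (l : List Int) (k : Int) (s e : ℕ) : Bool := l.any (fun x => decide (k ≤ cnt l s e x))

theorem gcnt_mono (l : List Int) {s e : ℕ} (h : s ≤ e) (x : Int) : gcnt l s x ≤ gcnt l e x := by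
  unfold gcnt
  have hst : l.take s = (l.take e).take s := by rw [List.take_take, min_eq_left h]
  rw [hst]
  exact (List.take_sublist s (l.take e)).count_le x

theorem cnt_nonneg (l : List Int) {s e : ℕ} (h : s ≤ e) (x : Int) : 0 ≤ cnt l s e x := by
  have := gcnt_mono l h x; unfold cnt; omega

theorem cnt_of_ge (l : List Int) {s e : ℕ} (h : e ≤ s) (x : Int) : cnt l s e x ≤ 0 := by
  have := gcnt_mono l h x; unfold cnt; omega

theorem cnt_mono (l : List Int) {s s' e e' : ℕ} (hs : s' ≤ s) (he : e ≤ e') (x : Int) :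
    cnt l s e x ≤ cnt l s' e' x := by
  have h1 := gcnt_mono l hs x; have h2 := gcnt_mono l he x; unfold cnt; omega

theorem gcnt_succ (l : List Int) {t : ℕ} (ht : t < l.length) (x : Int) :
    gcnt l (t + 1) x = gcnt l t x + if l[t] = x then 1 else 0 := by
  unfold gcnt
  rw [List.take_add_one, List.getElem?_eq_getElem ht]
  rw [List.count_append]
  simp [List.count_cons]

theorem cnt_succ_e (l : List Int) {s t : ℕ} (ht : t < l.length) (x : Int) :
    cnt l s (t + 1) x = cnt l s t x + if l[t] = x then 1 else 0 := by
  unfold cnt; rw [gcnt_succ l ht x]; split_ifs <;> push_cast <;> ring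

theorem cnt_succ_s (l : List Int) {s e : ℕ} (hs : s < l.length) (x : Int) :
    cnt l (s + 1) e x = cnt l s e x - if l[s] = x then 1 else 0 := by
  unfold cnt; rw [gcnt_succ l hs x]; split_ifs <;> push_cast <;> ring

theorem mem_of_cnt_pos {l : List Int} {s e : ℕ} {x : Int} (h : 0 < cnt l s e x) : x ∈ l := by
  have hg : 0 < gcnt l e x := by unfold cnt at h; omega
  have : x ∈ l.take e := List.count_pos_iff.mp hg
  exact (List.take_sublist e l).mem this

theorem good_iff {l : List Int} {k : Int} (hk : 1 ≤ k) (s e : ℕ) :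
    goodb l k s e = true ↔ ∃ x, k ≤ cnt l s e x := by
  unfold goodb
  simp only [List.any_eq_true, decide_eq_true_eq]
  constructor
  · rintro ⟨x, _, hx⟩; exact ⟨x, hx⟩
  · rintro ⟨x, hx⟩
    exact ⟨x, mem_of_cnt_pos (l := l) (s := s) (e := e) (by omega), hx⟩

theorem lt_of_good {l : List Int} {k : Int} {s e : ℕ} (hk : 1 ≤ k)
    (h : goodb l k s e = true) : s < e := by
  obtain ⟨x, hx⟩ := (good_iff hk s e).mp h
  by_contra hc
  push_neg at hc
  have := cnt_of_ge l hc x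
  omega

theorem not_good_of_ge {l : List Int} {k : Int} {s e : ℕ} (hk : 1 ≤ k) (h : e ≤ s) :
    goodb l k s e = false := by
  by_contra hc
  have := lt_of_good hk (by simpa using hc)
  omega

-- the start index after the whole shrinking phase of end-index e (window end e+1)
def shrink (l : List Int) (k : Int) (e : ℕ) (s : ℕ) : ℕ :=
  if h : s ≤ e ∧ goodb l k s (e + 1) = true then shrink l k e (s + 1) else s
termination_by e + 1 - s
decreasing_by omega

-- the start index after processing end-indices 0, …, t-1
def starts (l : List Int) (k : Int) : ℕ → ℕ
  | 0 => 0
  | e + 1 => shrink l k e (starts l k e)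

theorem shrink_eq {l : List Int} {k : Int} (hk : 1 ≤ k) (e s : ℕ) :
    shrink l k e s = if goodb l k s (e + 1) = true then shrink l k e (s + 1) else s := by
  rw [shrink]
  by_cases hg : goodb l k s (e + 1) = true
  · have hlt := lt_of_good hk hg
    simp [hg, Nat.lt_succ_iff.mp hlt]
  · simp [hg]

theorem shrink_not_good {l : List Int} {k : Int} (hk : 1 ≤ k) (e s : ℕ) :
    goodb l k (shrink l k e s) (e + 1) = false := by
  fun_induction shrink l k e s with
  | case1 s h ih => exact ih
  | case2 s h =>
    rw [Classical.not_and_iff_not_or_not] at h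
    rcases h with h | h
    · exact not_good_of_ge hk (by omega)
    · simpa using h

theorem shrink_le {l : List Int} {k : Int} (e : ℕ) {s : ℕ} (hs : s ≤ e + 1) :
    shrink l k e s ≤ e + 1 := by
  fun_induction shrink l k e s with
  | case1 s h ih => exact ih (by omega)
  | case2 s h => omega

theorem starts_le (l : List Int) (k : Int) (t : ℕ) : starts l k t ≤ t := by
  induction t with
  | zero => simp [starts]
  | succ e ih => exact shrink_le e (by omega)

theorem not_good_starts {l : List Int} {k : Int} (hk : 1 ≤ k) (t : ℕ) :
    goodb l k (starts l k t) t = false := by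
  cases t with
  | zero => exact not_good_of_ge hk (by omega)
  | succ e => exact shrink_not_good hk e _

-- ---- dict facts not in the prelude (erase = filter on the items list) ----
theorem dict_get?_erase (d : PySem.Dict Int Int) (y x : Int) :
    (d.erase y).get? x = if x = y then none else d.get? x := by
  cases d with
  | mk items =>
    induction items with
    | nil => simp [PySem.Dict.erase, PySem.Dict.get?]
    | cons p rest ih =>
      simp only [PySem.Dict.erase, PySem.Dict.get?, List.filter_cons] at *
      by_cases h1 : p.1 = y <;> by_cases h2 : p.1 = x <;> simp_all

theorem dict_nodup_keys_erase {d : PySem.Dict Int Int} (y : Int) (h : d.keys.Nodup) :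
    (d.erase y).keys.Nodup := by
  cases d with
  | mk items =>
    have hsub : List.Sublist (List.filter (fun p => !p.1 == y) items) items := List.filter_sublist
    simp only [PySem.Dict.erase, PySem.Dict.keys] at *
    exact (hsub.map (fun q => q.1)).nodup h

-- invariant tying A's dict (zero entries deleted) to the window l[s:e]
def InvA (l : List Int) (d : PySem.Dict Int Int) (s e : ℕ) : Prop :=
  d.keys.Nodup ∧ ∀ x, d.get? x = if 0 < cnt l s e x then some (cnt l s e x) else none

-- invariant tying B's dict (zero entries kept) to the window l[s:e]
def InvB (l : List Int) (d : PySem.Dict Int Int) (s e : ℕ) : Prop :=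
  ∀ x, d.get? x = if 0 < gcnt l e x then some (cnt l s e x) else none

theorem maxveq {l : List Int} {k : Int} {d : PySem.Dict Int Int} {s e : ℕ} (hk : 1 ≤ k)
    (h : InvA l d s e) :
    (k ≤ (match PySem.List.max? d.values (fun w => w) with | none => 0 | some m => m)) ↔
      goodb l k s e = true := by
  cases hmax : PySem.List.max? d.values (fun w => w) with
  | none =>
    rw [PySem.List.max?_eq_none_iff] at hmax
    have hitems : d.items = [] := by
      have : d.items.map (fun p => p.2) = [] := hmax
      simpa using this
    simp only
    constructor
    · intro hle; omega
    · intro hg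
      obtain ⟨x, hx⟩ := (good_iff hk s e).mp hg
      have h2 := h.2 x
      simp only [PySem.Dict.get?, hitems, List.find?_nil, Option.map_none] at h2
      rw [if_pos (by omega : 0 < cnt l s e x)] at h2
      exact absurd h2 (by simp)
  | some m =>
    have hmem : m ∈ d.values := PySem.List.max?_mem hmax
    simp only [PySem.Dict.values, List.mem_map] at hmem
    obtain ⟨⟨x0, v0⟩, hp, hv0⟩ := hmem
    have hx0 : d.get? x0 = some m := by
      subst hv0; exact PySem.Dict.get?_of_mem_items d hp h.1
    have h2 := h.2 x0
    rw [hx0] at h2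
    have hm : m = cnt l s e x0 ∧ 0 < cnt l s e x0 := by
      by_cases hc : 0 < cnt l s e x0
      · rw [if_pos hc] at h2; exact ⟨(Option.some.injEq _ _ ▸ h2 : m = _), hc⟩
      · rw [if_neg hc] at h2; exact absurd h2 (by simp)
    simp only
    constructor
    · intro hkm
      exact (good_iff hk s e).mpr ⟨x0, by omega⟩
    · intro hg
      obtain ⟨x, hx⟩ := (good_iff hk s e).mp hg
      have hgx : d.get? x = some (cnt l s e x) := by
        rw [h.2 x, if_pos (by omega : 0 < cnt l s e x)]
      have hmemx : cnt l s e x ∈ d.values := by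
        have := PySem.Dict.mem_items_of_get?_eq_some d hgx
        simp only [PySem.Dict.values, List.mem_map]
        exact ⟨(x, cnt l s e x), this, rfl⟩
      have := PySem.List.max?_id_le hmax _ hmemx
      omega

-- ---- the A side ----
-- count accumulated by A after processing end-indices 0, …, t-1
def Cm (l : List Int) (k : Int) : ℕ → ℤ
  | 0 => 0
  | t + 1 => Cm l k t + ((l.length : ℤ) - t) * ((starts l k (t + 1) : ℤ) - (starts l k t : ℤ))

theorem gcnt_pos {l : List Int} {s e : ℕ} (hs : s < l.length) (hse : s < e) :
    0 < gcnt l e l[s] := by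
  unfold gcnt
  rw [List.count_pos_iff]
  refine List.mem_iff_getElem.mpr ⟨s, ?_, ?_⟩
  · simp [List.length_take]; omega
  · exact List.getElem_take

theorem aWhile_spec {l : List Int} {k : Int} (hk : 1 ≤ k) (t : ℕ) (ht : t < l.length) :
    ∀ fuel s (C : ℤ) d M, InvA l d s (t + 1) → s ≤ t + 1 → t + 1 - s < fuel →
      ((k ≤ M) ↔ goodb l k s (t + 1) = true) →
      ∃ d' M', aWhile l k (l.length : ℤ) (t : ℤ) fuel (C, (s : ℤ), d, M) =
          (C + ((l.length : ℤ) - t) * ((shrink l k t s : ℤ) - (s : ℤ)), (shrink l k t s : ℤ), d', M') ∧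
        InvA l d' (shrink l k t s) (t + 1) ∧ M' < k := by
  intro fuel
  induction fuel with
  | zero => intro s C d M _ _ hf _; omega
  | succ f ih =>
    intro s C d M hinv hs hf hM
    by_cases hkM : k ≤ M
    · have hgood : goodb l k s (t + 1) = true := hM.mp hkM
      have hslt : s < t + 1 := lt_of_good hk hgood
      have hsl : s < l.length := by omega
      have hget : PySem.List.pyGet? l (s : ℤ) = some l[s] := by
        rw [PySem.List.pyGet?_natCast]; exact List.getElem?_eq_getElem hsl
      have hcnt_s : cnt l (s + 1) (t + 1) l[s] = cnt l s (t + 1) l[s] - 1 := by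
        rw [cnt_succ_s l hsl]; simp
      have hnn : 0 ≤ cnt l (s + 1) (t + 1) l[s] := cnt_nonneg l (by omega) _
      have hpos : 0 < cnt l s (t + 1) l[s] := by omega
      have hgets : d.get? l[s] = some (cnt l s (t + 1) l[s]) := by rw [hinv.2, if_pos hpos]
      set v := cnt l s (t + 1) l[s] with hv
      set d3 := if v - 1 = 0 then (d.insert l[s] (v - 1)).erase l[s] else d.insert l[s] (v - 1)
        with hd3
      have hd3get : ∀ x, d3.get? x =
          if 0 < cnt l (s + 1) (t + 1) x then some (cnt l (s + 1) (t + 1) x) else none := by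
        intro x
        by_cases hx : x = l[s]
        · subst hx
          rw [hd3]
          by_cases hz : v - 1 = 0
          · rw [if_pos hz, dict_get?_erase, if_pos rfl, if_neg (by omega)]
          · rw [if_neg hz, PySem.Dict.get?_insert, if_pos rfl, if_pos (by omega), hcnt_s]
        · have hcx : cnt l (s + 1) (t + 1) x = cnt l s (t + 1) x := by
            rw [cnt_succ_s l hsl, if_neg (fun hq => hx hq.symm)]; ring
          have hbase : (d.insert l[s] (v - 1)).get? x = d.get? x := by
            rw [PySem.Dict.get?_insert, if_neg hx]
          rw [hd3]
          by_cases hz : v - 1 = 0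
          · rw [if_pos hz, dict_get?_erase, if_neg hx, hbase, hinv.2, hcx]
          · rw [if_neg hz, hbase, hinv.2, hcx]
      have hd3nodup : d3.keys.Nodup := by
        rw [hd3]
        by_cases hz : v - 1 = 0
        · rw [if_pos hz]
          exact dict_nodup_keys_erase _ (PySem.Dict.nodup_keys_insert _ _ _ hinv.1)
        · rw [if_neg hz]
          exact PySem.Dict.nodup_keys_insert _ _ _ hinv.1
      have hinv3 : InvA l d3 (s + 1) (t + 1) := ⟨hd3nodup, hd3get⟩
      have hM2 := maxveq hk hinv3
      have hshr : shrink l k t s = shrink l k t (s + 1) := by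
        rw [shrink_eq hk t s, if_pos hgood]
      obtain ⟨d', M', heq, hinv', hM'⟩ :=
        ih (s + 1) (C + ((l.length : ℤ) - t)) d3 _ hinv3 (by omega) (by omega) hM2
      refine ⟨d', M', ?_, by rwa [hshr], hM'⟩
      push_cast at heq
      simp only [aWhile]
      rw [if_pos hkM, hget]
      simp only [hgets]
      rw [← hd3, hshr, heq]
      congr 1
      ring
    · have hgood : goodb l k s (t + 1) = false := by
        rcases Bool.eq_false_or_eq_true (goodb l k s (t + 1)) with h | h
        · exact absurd (hM.mpr h) hkM
        · exact h
      have hshr : shrink l k t s = s := by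
        rw [shrink_eq hk t s, if_neg (by simp [hgood])]
      refine ⟨d, M, ?_, by rwa [hshr], by omega⟩
      simp only [aWhile]
      rw [if_neg hkM, hshr]
      congr 1
      ring

theorem foldA {l : List Int} {k : Int} (hk : 1 ≤ k) (t : ℕ) (ht : t ≤ l.length) :
    ∃ d M, (PySem.List.pyRange 0 (t : ℤ) 1).foldl (aStep l k (l.length : ℤ))
        (0, 0, PySem.Dict.empty, 0) = (Cm l k t, (starts l k t : ℤ), d, M) ∧
      InvA l d (starts l k t) t ∧ M < k := by
  induction t with
  | zero =>
    refine ⟨PySem.Dict.empty, 0, ?_, ⟨PySem.Dict.nodup_keys_empty, ?_⟩, by omega⟩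
    · have h0 : PySem.List.pyRange 0 ((0 : ℕ) : ℤ) 1 = [] :=
        PySem.List.pyRange_one_eq_nil (by norm_num)
      rw [h0]
      simp [Cm, starts]
    · intro x
      rw [PySem.Dict.get?_empty]
      have hs0 : starts l k 0 = 0 := rfl
      have hc : cnt l (starts l k 0) 0 x = 0 := by rw [hs0]; unfold cnt; omega
      rw [if_neg (by omega)]
  | succ t ihh =>
    have htl : t < l.length := by omega
    obtain ⟨d, M, hfold, hinv, hMk⟩ := ihh (by omega)
    have hrange : PySem.List.pyRange 0 ((t + 1 : ℕ) : ℤ) 1 =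
        PySem.List.pyRange 0 (t : ℤ) 1 ++ [(t : ℤ)] := by
      push_cast
      exact PySem.List.pyRange_one_succ_right (Int.natCast_nonneg t)
    rw [hrange, List.foldl_append, hfold]
    have hsle : starts l k t ≤ t := starts_le l k t
    have hget : PySem.List.pyGet? l (t : ℤ) = some l[t] := by
      rw [PySem.List.pyGet?_natCast]; exact List.getElem?_eq_getElem htl
    have hnotgood : goodb l k (starts l k t) t = false := not_good_starts hk t
    have hcnt_e : cnt l (starts l k t) (t + 1) l[t] = cnt l (starts l k t) t l[t] + 1 := by
      rw [cnt_succ_e l htl, if_pos rfl]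
    have hcnn : 0 ≤ cnt l (starts l k t) t l[t] := cnt_nonneg l hsle _
    have hfreq1eq : (if d.contains l[t] then d.insert l[t] (d.getD l[t] 0 + 1)
        else d.insert l[t] 1) = d.insert l[t] (cnt l (starts l k t) t l[t] + 1) := by
      by_cases hc : 0 < cnt l (starts l k t) t l[t]
      · have hg : d.get? l[t] = some (cnt l (starts l k t) t l[t]) := by
          rw [hinv.2, if_pos hc]
        have hcont : d.contains l[t] = true := by
          rw [PySem.Dict.contains_eq_isSome_get?, hg]; rfl
        rw [if_pos hcont, PySem.Dict.getD_eq_get?_getD, hg]; rfl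
      · have hg : d.get? l[t] = none := by rw [hinv.2, if_neg hc]
        have hcont : d.contains l[t] = false := by
          rw [PySem.Dict.contains_eq_isSome_get?, hg]; rfl
        have hz : cnt l (starts l k t) t l[t] = 0 := by omega
        rw [if_neg (by simp [hcont]), hz]
        norm_num
    have hinv1 : InvA l (d.insert l[t] (cnt l (starts l k t) t l[t] + 1)) (starts l k t) (t + 1) := by
      refine ⟨PySem.Dict.nodup_keys_insert _ _ _ hinv.1, ?_⟩
      intro x
      rw [PySem.Dict.get?_insert]
      by_cases hx : x = l[t]
      · subst hx
        rw [if_pos rfl, hcnt_e, if_pos (by omega)]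
      · have hcx : cnt l (starts l k t) (t + 1) x = cnt l (starts l k t) t x := by
          rw [cnt_succ_e l htl, if_neg (fun hq => hx hq.symm)]; ring
        rw [if_neg hx, hinv.2, hcx]
    have hgd : (d.insert l[t] (cnt l (starts l k t) t l[t] + 1)).getD l[t] 0 =
        cnt l (starts l k t) (t + 1) l[t] := by
      rw [PySem.Dict.getD_eq_get?_getD, hinv1.2, if_pos (by omega)]; rfl
    have hM1 : (k ≤ max M (cnt l (starts l k t) (t + 1) l[t])) ↔
        goodb l k (starts l k t) (t + 1) = true := by
      constructor
      · intro h
        have hck : k ≤ cnt l (starts l k t) (t + 1) l[t] := by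
          rcases le_max_iff.mp h with h' | h'
          · omega
          · exact h'
        exact (good_iff hk _ _).mpr ⟨l[t], hck⟩
      · intro hg
        obtain ⟨y, hy⟩ := (good_iff hk _ _).mp hg
        by_cases hyx : y = l[t]
        · subst hyx; exact le_max_of_le_right hy
        · have hcy : cnt l (starts l k t) (t + 1) y = cnt l (starts l k t) t y := by
            rw [cnt_succ_e l htl, if_neg (fun hq => hyx hq.symm)]; ring
          have hgt : goodb l k (starts l k t) t = true :=
            (good_iff hk _ _).mpr ⟨y, by omega⟩
          rw [hnotgood] at hgt
          exact absurd hgt (by simp)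
    obtain ⟨d', M', heq, hinv', hM'⟩ :=
      aWhile_spec hk t htl (l.length + 1) (starts l k t) (Cm l k t)
        (d.insert l[t] (cnt l (starts l k t) t l[t] + 1))
        (max M (cnt l (starts l k t) (t + 1) l[t])) hinv1 (by omega) (by omega) hM1
    refine ⟨d', M', ?_, ?_, hM'⟩
    · simp only [List.foldl_cons, List.foldl_nil, aStep, hget]
      rw [hfreq1eq, hgd, heq]
      have hstarts : starts l k (t + 1) = shrink l k t (starts l k t) := rfl
      have hCm : Cm l k (t + 1) = Cm l k t +
          ((l.length : ℤ) - t) * ((starts l k (t + 1) : ℤ) - (starts l k t : ℤ)) := rfl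
      rw [hCm, hstarts]
    · have hstarts : starts l k (t + 1) = shrink l k t (starts l k t) := rfl
      rw [hstarts]
      exact hinv'

-- ---- the B side ----
-- bad-subarray count accumulated by B after processing end-indices 0, …, t-1
def Bm (l : List Int) (k : Int) : ℕ → ℤ
  | 0 => 0
  | t + 1 => Bm l k t + ((t : ℤ) - (starts l k (t + 1) : ℤ) + 1)

theorem bWhile_spec {l : List Int} {k : Int} (hk : 1 ≤ k) (t : ℕ) (ht : t < l.length) :
    ∀ fuel s d, InvB l d s (t + 1) → s ≤ t + 1 → t + 1 - s < fuel →
      (∀ y, y ≠ l[t] → cnt l s (t + 1) y < k) →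
      ∃ d', bWhile l k (l[t]) fuel (d, (s : ℤ)) = (d', (shrink l k t s : ℤ)) ∧
        InvB l d' (shrink l k t s) (t + 1) := by
  intro fuel
  induction fuel with
  | zero => intro s d _ _ hf _; omega
  | succ f ih =>
    intro s d hinv hs hf hside
    have hgx : 0 < gcnt l (t + 1) l[t] := gcnt_pos ht (by omega)
    have hgetx : d.getD l[t] 0 = cnt l s (t + 1) l[t] := by
      rw [PySem.Dict.getD_eq_get?_getD, hinv l[t], if_pos hgx]; rfl
    have hcond : (k ≤ d.getD l[t] 0) ↔ goodb l k s (t + 1) = true := by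
      rw [hgetx]
      constructor
      · intro hc; exact (good_iff hk s (t + 1)).mpr ⟨l[t], hc⟩
      · intro hg
        obtain ⟨y, hy⟩ := (good_iff hk s (t + 1)).mp hg
        by_cases hyx : y = l[t]
        · subst hyx; exact hy
        · exact absurd hy (by have := hside y hyx; omega)
    by_cases hkM : k ≤ d.getD l[t] 0
    · have hgood : goodb l k s (t + 1) = true := hcond.mp hkM
      have hslt : s < t + 1 := lt_of_good hk hgood
      have hsl : s < l.length := by omega
      have hget : PySem.List.pyGet? l (s : ℤ) = some l[s] := by
        rw [PySem.List.pyGet?_natCast]; exact List.getElem?_eq_getElem hsl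
      have hgs : 0 < gcnt l (t + 1) l[s] := gcnt_pos hsl (by omega)
      have hgets : d.get? l[s] = some (cnt l s (t + 1) l[s]) := by
        rw [hinv l[s], if_pos hgs]
      have hcnt_s : cnt l (s + 1) (t + 1) l[s] = cnt l s (t + 1) l[s] - 1 := by
        rw [cnt_succ_s l hsl]; simp
      set d2 := d.insert l[s] (cnt l s (t + 1) l[s] - 1) with hd2
      have hinv2 : InvB l d2 (s + 1) (t + 1) := by
        intro x
        by_cases hx : x = l[s]
        · subst hx
          rw [hd2, PySem.Dict.get?_insert, if_pos rfl, if_pos hgs, hcnt_s]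
        · have hcx : cnt l (s + 1) (t + 1) x = cnt l s (t + 1) x := by
            rw [cnt_succ_s l hsl, if_neg (fun hq => hx hq.symm)]; ring
          rw [hd2, PySem.Dict.get?_insert, if_neg hx, hinv x, hcx]
      have hside2 : ∀ y, y ≠ l[t] → cnt l (s + 1) (t + 1) y < k := by
        intro y hy
        have := hside y hy
        have hmono := cnt_mono l (by omega : s ≤ s + 1) (le_refl (t + 1)) y
        omega
      have hshr : shrink l k t s = shrink l k t (s + 1) := by
        rw [shrink_eq hk t s, if_pos hgood]
      obtain ⟨d', heq, hinv'⟩ := ih (s + 1) d2 hinv2 (by omega) (by omega) hside2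
      refine ⟨d', ?_, by rwa [hshr]⟩
      push_cast at heq
      simp only [bWhile]
      rw [if_pos hkM, hget]
      simp only [hgets]
      rw [← hd2, hshr]
      exact heq
    · have hgood : goodb l k s (t + 1) = false := by
        rcases Bool.eq_false_or_eq_true (goodb l k s (t + 1)) with h | h
        · exact absurd (hcond.mpr h) hkM
        · exact h
      have hshr : shrink l k t s = s := by
        rw [shrink_eq hk t s, if_neg (by simp [hgood])]
      refine ⟨d, ?_, by rwa [hshr]⟩
      simp only [bWhile]
      rw [if_neg hkM, hshr]

theorem foldB {l : List Int} {k : Int} (hk : 1 ≤ k) (t : ℕ) (ht : t ≤ l.length) :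
    ∃ d, (PySem.List.pyRange 0 (t : ℤ) 1).foldl (bStep l k) (PySem.Dict.empty, 0, 0) =
        (d, (starts l k t : ℤ), Bm l k t) ∧ InvB l d (starts l k t) t := by
  induction t with
  | zero =>
    refine ⟨PySem.Dict.empty, ?_, ?_⟩
    · have h0 : PySem.List.pyRange 0 ((0 : ℕ) : ℤ) 1 = [] :=
        PySem.List.pyRange_one_eq_nil (by norm_num)
      rw [h0]
      simp [Bm, starts]
    · intro x
      rw [PySem.Dict.get?_empty]
      have hg0 : gcnt l 0 x = 0 := by unfold gcnt; simp
      rw [if_neg (by omega)]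
  | succ t ihh =>
    have htl : t < l.length := by omega
    obtain ⟨d, hfold, hinv⟩ := ihh (by omega)
    have hrange : PySem.List.pyRange 0 ((t + 1 : ℕ) : ℤ) 1 =
        PySem.List.pyRange 0 (t : ℤ) 1 ++ [(t : ℤ)] := by
      push_cast
      exact PySem.List.pyRange_one_succ_right (Int.natCast_nonneg t)
    rw [hrange, List.foldl_append, hfold]
    have hsle : starts l k t ≤ t := starts_le l k t
    have hget : PySem.List.pyGet? l (t : ℤ) = some l[t] := by
      rw [PySem.List.pyGet?_natCast]; exact List.getElem?_eq_getElem htl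
    have hnotgood : goodb l k (starts l k t) t = false := not_good_starts hk t
    have hcnt_e : cnt l (starts l k t) (t + 1) l[t] = cnt l (starts l k t) t l[t] + 1 := by
      rw [cnt_succ_e l htl, if_pos rfl]
    have hgd : d.getD l[t] 0 = cnt l (starts l k t) t l[t] := by
      rw [PySem.Dict.getD_eq_get?_getD, hinv l[t]]
      by_cases hg : 0 < gcnt l t l[t]
      · rw [if_pos hg]; rfl
      · rw [if_neg hg]
        have h1 := gcnt_mono l hsle l[t]
        have hz : cnt l (starts l k t) t l[t] = 0 := by unfold cnt; omega
        rw [hz]; rfl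
    have hinv1 : InvB l (d.insert l[t] (cnt l (starts l k t) t l[t] + 1)) (starts l k t) (t + 1) := by
      intro x
      rw [PySem.Dict.get?_insert]
      by_cases hx : x = l[t]
      · subst hx
        rw [if_pos rfl, if_pos (by rw [gcnt_succ l htl, if_pos rfl]; omega), hcnt_e]
      · have hgx : gcnt l (t + 1) x = gcnt l t x := by
          rw [gcnt_succ l htl, if_neg (fun hq => hx hq.symm)]
          omega
        have hcx : cnt l (starts l k t) (t + 1) x = cnt l (starts l k t) t x := by
          rw [cnt_succ_e l htl, if_neg (fun hq => hx hq.symm)]; ring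
        rw [if_neg hx, hinv x, hgx, hcx]
    have hside : ∀ y, y ≠ l[t] → cnt l (starts l k t) (t + 1) y < k := by
      intro y hy
      by_contra hc
      push_neg at hc
      have hcy : cnt l (starts l k t) (t + 1) y = cnt l (starts l k t) t y := by
        rw [cnt_succ_e l htl, if_neg (fun hq => hy hq.symm)]; ring
      have hgt : goodb l k (starts l k t) t = true := (good_iff hk _ _).mpr ⟨y, by omega⟩
      rw [hnotgood] at hgt
      exact absurd hgt (by simp)
    obtain ⟨d', heq, hinv'⟩ :=
      bWhile_spec hk t htl (l.length + 1) (starts l k t)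
        (d.insert l[t] (cnt l (starts l k t) t l[t] + 1)) hinv1 (by omega) (by omega) hside
    refine ⟨d', ?_, ?_⟩
    · simp only [List.foldl_cons, List.foldl_nil, bStep, hget]
      rw [hgd, heq]
      have hstarts : starts l k (t + 1) = shrink l k t (starts l k t) := rfl
      have hBm : Bm l k (t + 1) = Bm l k t + ((t : ℤ) - (starts l k (t + 1) : ℤ) + 1) := rfl
      rw [hBm, hstarts]
    · have hstarts : starts l k (t + 1) = shrink l k t (starts l k t) := rfl
      rw [hstarts]
      exact hinv'

-- ---- assembly: both results equal Σ_j starts(j) ----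
def Ssum (l : List Int) (k : Int) : ℕ → ℤ
  | 0 => 0
  | t + 1 => Ssum l k t + (starts l k (t + 1) : ℤ)

theorem Cm_closed (l : List Int) (k : Int) (t : ℕ) :
    Cm l k t = ((l.length : ℤ) - t) * (starts l k t : ℤ) + Ssum l k t := by
  induction t with
  | zero => simp [Cm, Ssum, starts]
  | succ t ih => simp only [Cm, Ssum, ih]; push_cast; ring

theorem Bm_closed (l : List Int) (k : Int) (t : ℕ) :
    Bm l k t + Ssum l k t = (t : ℤ) * ((t : ℤ) + 1) / 2 := by
  induction t with
  | zero => simp [Bm, Ssum]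
  | succ t ih =>
    have h2 : ((t : ℤ) + 1) * ((t : ℤ) + 2) = (t : ℤ) * ((t : ℤ) + 1) + 2 * ((t : ℤ) + 1) := by ring
    simp only [Bm, Ssum]
    push_cast
    have hsplit : ((t : ℤ) + 1) * ((t : ℤ) + 1 + 1) = (t : ℤ) * ((t : ℤ) + 1) + ((t : ℤ) + 1) * 2 := by
      ring
    rw [hsplit, Int.add_mul_ediv_right _ _ (by norm_num : (2 : ℤ) ≠ 0)]
    omega

theorem main_eq {l : List Int} {k : Int} (hk : 1 ≤ k) :
    count_valid_subarrays l k = count_valid_subarrays_alt l k := by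
  obtain ⟨dA, M, hA, _, _⟩ := foldA hk l.length le_rfl
  obtain ⟨dB, hB, _⟩ := foldB hk l.length le_rfl
  simp only [count_valid_subarrays, count_valid_subarrays_alt]
  rw [hA, hB]
  rw [PySem.Int.floordiv_eq_ediv_of_pos (by norm_num : (0 : ℤ) < 2)]
  rw [Cm_closed]
  have hB2 := Bm_closed l k l.length
  linarith [hB2]

-- ===== VERDICT (by name: the statement is the Claim_ definition above) =====
theorem count_valid_subarrays_spec : Claim_equal_count_valid_subarrays := by
  intro nums k _ hpre
  unfold Spec_count_valid_subarrays
  rcases hpre with hk | hnil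
  · exact main_eq hk
  · subst hnil; rfl
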